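-- pv_equiv track=rewrite | github.com/malpipapi/Algorithm_Vacation | 1week_code/scovlie.py | solution
-- ===== SOURCE A (Python) =====
-- import heapq
--
-- def solution(scoville, K):
--     heapq.heapify(scoville)
--     answer = 0
--     while len(scoville)>=2:
--         min_scoville1=heapq.heappop(scoville)
--         if min_scoville1>=K:
--             return answer
--         else:
--             min_scoville2 = heapq.heappop(scoville)
--             heapq.heappush(scoville,min_scoville1+(min_scoville2*2))
--             answer+=1
--
--
--     if scoville[0]>=K:
--         return answer
--     else:
--         return -1
-- ===== SOURCE B (Python) =====
-- # Two-queue merge: sort once, then the sorted input and the merged values are two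
-- # non-decreasing FIFOs; the global minimum is always one of the two fronts, so no heap.
-- # (A heapifies its argument in place; B leaves the argument untouched.)
-- def solution(scoville, K):
--     q1 = sorted(scoville)
--     q2 = []
--     i = 0  # front of q1
--     j = 0  # front of q2
--     answer = 0
--     while (len(q1) - i) + (len(q2) - j) >= 2:
--         if j >= len(q2) or (i < len(q1) and q1[i] <= q2[j]):
--             a = q1[i]; i += 1
--         else:
--             a = q2[j]; j += 1
--         if a >= K:
--             return answer
--         if j >= len(q2) or (i < len(q1) and q1[i] <= q2[j]):
--             b = q1[i]; i += 1
--         else: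
--             b = q2[j]; j += 1
--         q2.append(a + 2 * b)
--         answer += 1
--     last = q1[i] if i < len(q1) else q2[j]
--     return answer if last >= K else -1
-- ===== Notes on version B (the rewrite author's own statement) =====
-- stated objective: faster
-- what changed: Replaces the binary heap with a sort plus two FIFO queues (the sorted input and the merged values, which provably come out non-decreasing), so each merge step is O(1) pointer moves instead of heap pop/push.
import Mathlib
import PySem

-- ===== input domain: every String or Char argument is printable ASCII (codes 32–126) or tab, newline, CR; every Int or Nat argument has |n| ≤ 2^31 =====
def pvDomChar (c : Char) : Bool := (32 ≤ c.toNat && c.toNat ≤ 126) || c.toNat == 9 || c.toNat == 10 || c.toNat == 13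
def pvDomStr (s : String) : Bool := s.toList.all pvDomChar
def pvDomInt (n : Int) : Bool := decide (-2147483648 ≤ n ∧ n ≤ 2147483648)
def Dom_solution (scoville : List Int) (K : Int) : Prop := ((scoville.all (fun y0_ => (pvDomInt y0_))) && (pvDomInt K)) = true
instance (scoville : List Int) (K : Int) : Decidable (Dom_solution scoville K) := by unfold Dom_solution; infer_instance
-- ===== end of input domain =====

-- B replaces A's binary heap by a sort plus two FIFO queues; equivalence is about the
-- RETURN value only (A heapifies/pops its argument in place, B leaves it untouched).

-- ===== PORT A =====
-- heapq.heappop returns the smallest element; its port extracts the minimum value and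
-- erases one occurrence of it (equal Ints are indistinguishable, so this is exact).
-- termination helper, cited by decreasing_by
theorem pv_minD_mem (l : List Int) (h : l ≠ []) : (l.min?).getD 0 ∈ l := by
  match hm : l.min? with
  | some m => simpa [hm] using List.min?_mem hm
  | none => simp_all [List.min?_eq_none_iff]

def solutionLoop (K : Int) (l : List Int) (answer : Int) : Int :=
  if h : 2 ≤ l.length then
    -- min1 := heappop(scoville); min2 := heappop(scoville); push min1 + min2*2
    if (l.min?).getD 0 ≥ K then answer
    else
      solutionLoop K
        (((l.min?).getD 0 + ((l.erase ((l.min?).getD 0)).min?).getD 0 * 2) ::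
          (l.erase ((l.min?).getD 0)).erase (((l.erase ((l.min?).getD 0)).min?).getD 0))
        (answer + 1)
  else
    match l with
    | [] => -1                           -- Python: scoville[0] raises IndexError (outside Pre_)
    | x :: _ => if x ≥ K then answer else -1
termination_by l.length
decreasing_by
  have hne : l ≠ [] := by intro e; simp [e] at h
  have h1 : (l.min?).getD 0 ∈ l := pv_minD_mem l hne
  have e1 : (l.erase ((l.min?).getD 0)).length = l.length - 1 := List.length_erase_of_mem h1
  have hne1 : (l.erase ((l.min?).getD 0)) ≠ [] := by
    intro e; rw [e] at e1; simp at e1; omega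
  have h2 : ((l.erase ((l.min?).getD 0)).min?).getD 0 ∈ l.erase ((l.min?).getD 0) :=
    pv_minD_mem _ hne1
  have e2 := List.length_erase_of_mem h2
  simp only [List.length_cons, e2, e1]
  omega

def solution (scoville : List Int) (K : Int) : Int :=
  solutionLoop K scoville 0

-- ===== PORT B =====
-- pop the smaller front of the two queues (q2 empty-or-larger → q1, else q2)
def popQ (q1 q2 : List Int) : Int × List Int × List Int :=
  match q1, q2 with
  | [], [] => (0, [], [])                -- unreachable under the loop guard (Python would raise)
  | x :: t1, [] => (x, t1, [])
  | [], y :: t2 => (y, [], t2)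
  | x :: t1, y :: t2 => if x ≤ y then (x, t1, y :: t2) else (y, x :: t1, t2)

-- termination helper, cited by decreasing_by
theorem popQ_length (q1 q2 : List Int) (h : 1 ≤ q1.length + q2.length) :
    (popQ q1 q2).2.1.length + (popQ q1 q2).2.2.length + 1 = q1.length + q2.length := by
  match q1, q2 with
  | [], [] => simp at h
  | x :: t1, [] => simp [popQ]
  | [], y :: t2 => simp [popQ]
  | x :: t1, y :: t2 =>
    by_cases hxy : x ≤ y <;> simp [popQ, hxy] <;> omega

def solutionAltLoop (K : Int) (q1 q2 : List Int) (answer : Int) : Int :=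
  if h : 2 ≤ q1.length + q2.length then
    -- a := pop smaller front; b := pop smaller front; append a + 2*b to q2
    if (popQ q1 q2).1 ≥ K then answer
    else
      solutionAltLoop K
        (popQ (popQ q1 q2).2.1 (popQ q1 q2).2.2).2.1
        ((popQ (popQ q1 q2).2.1 (popQ q1 q2).2.2).2.2 ++
          [(popQ q1 q2).1 + 2 * (popQ (popQ q1 q2).2.1 (popQ q1 q2).2.2).1])
        (answer + 1)
  else
    match q1, q2 with
    | x :: _, _ => if x ≥ K then answer else -1
    | [], y :: _ => if y ≥ K then answer else -1
    | [], [] => -1                       -- Python: IndexError (outside Pre_)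
termination_by q1.length + q2.length
decreasing_by
  have e1 := popQ_length q1 q2 (by omega)
  have e2 := popQ_length (popQ q1 q2).2.1 (popQ q1 q2).2.2 (by omega)
  simp only [List.length_append, List.length_cons, List.length_nil]
  omega

def solution_alt (scoville : List Int) (K : Int) : Int :=
  solutionAltLoop K (PySem.List.sorted scoville (fun x => x) false) [] 0

-- ===== PRECONDITION & SPEC =====
-- Pre_ excludes only the empty list, on which the Python A raises IndexError (scoville[0]).
def Pre_solution (scoville : List Int) (K : Int) : Prop := scoville ≠ []
instance (scoville : List Int) (K : Int) : Decidable (Pre_solution scoville K) := by unfold Pre_solution; infer_instance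
def pvWitness_solution : List Int × Int := ([1, 2, 3, 9, 10, 12], 7)

def Spec_solution (scoville : List Int) (K : Int) (out : Int) : Prop := out = solution_alt scoville K
instance (scoville : List Int) (K : Int) (out : Int) : Decidable (Spec_solution scoville K out) := by unfold Spec_solution; infer_instance

-- ===== CLAIM (what is proved, stated in full; the proofs are below) =====
def Claim_equal_solution : Prop := ∀ (scoville : List Int) (K : Int), Dom_solution scoville K → Pre_solution scoville K → Spec_solution scoville K (solution scoville K)

-- ===== LEMMAS AND PROOFS =====

-- the two-queue invariant: the last merged value is ≤ 3·x for every other pooled value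
def Q2Inv (q1 q2 : List Int) : Prop :=
  ∀ L ∈ q2.getLast?, ∀ x ∈ q1 ++ q2.dropLast, L ≤ 3 * x

-- min? of a list characterised by membership + lower bound
theorem pv_min?_eq (l : List Int) (a : Int) (hmem : a ∈ l) (hle : ∀ b ∈ l, a ≤ b) :
    l.min? = some a := by
  rw [List.min?_eq_some_iff]; exact ⟨hmem, hle⟩

-- head of a sorted list bounds every element
theorem pv_sorted_head_le (x : Int) (t : List Int) (h : (x :: t).Sorted (· ≤ ·)) :
    ∀ y ∈ x :: t, x ≤ y := by
  intro y hy
  rcases List.mem_cons.1 hy with rfl | hy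
  · exact le_refl y
  · exact (List.sorted_cons.1 h).1 y hy

theorem pv_pop_spec (q1 q2 : List Int) (h : 1 ≤ q1.length + q2.length)
    (h1 : q1.Sorted (· ≤ ·)) (h2 : q2.Sorted (· ≤ ·)) :
    ((popQ q1 q2).1 ∈ q1 ++ q2) ∧
    (∀ x ∈ q1 ++ q2, (popQ q1 q2).1 ≤ x) ∧
    ((q1 ++ q2).erase (popQ q1 q2).1 = (popQ q1 q2).2.1 ++ (popQ q1 q2).2.2) ∧
    (popQ q1 q2).2.1.Sorted (· ≤ ·) ∧ (popQ q1 q2).2.2.Sorted (· ≤ ·) ∧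
    (popQ q1 q2).2.1 ⊆ q1 ∧ (popQ q1 q2).2.2 ⊆ q2 := by
  match q1, q2 with
  | [], [] => simp at h
  | x :: t1, [] =>
    refine ⟨by simp [popQ], ?_, by simp [popQ], ?_, by simp only [popQ]; exact List.Pairwise.nil, ?_, by simp [popQ]⟩
    · intro z hz
      simp only [popQ]
      exact pv_sorted_head_le x t1 h1 z (by simpa using hz)
    · exact (List.sorted_cons.1 h1).2
    · simp only [popQ]; exact List.subset_cons_self x t1
  | [], y :: t2 =>
    refine ⟨by simp [popQ], ?_, by simp [popQ], by simp only [popQ]; exact List.Pairwise.nil, ?_, by simp [popQ], ?_⟩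
    · intro z hz
      simp only [popQ]
      exact pv_sorted_head_le y t2 h2 z (by simpa using hz)
    · exact (List.sorted_cons.1 h2).2
    · simp only [popQ]; exact List.subset_cons_self y t2
  | x :: t1, y :: t2 =>
    by_cases hxy : x ≤ y
    · refine ⟨by simp [popQ, hxy], ?_, ?_, ?_, by simp [popQ, hxy]; exact h2, ?_, by simp [popQ, hxy]⟩
      · intro z hz
        simp only [popQ, if_pos hxy]
        rcases List.mem_append.1 hz with hz | hz
        · exact pv_sorted_head_le x t1 h1 z hz
        · exact le_trans hxy (pv_sorted_head_le y t2 h2 z hz)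
      · simp only [popQ, if_pos hxy, List.cons_append, List.erase_cons_head]
      · simp only [popQ, if_pos hxy]
        exact (List.sorted_cons.1 h1).2
      · simp only [popQ, if_pos hxy]
        exact List.subset_cons_self x t1
    · have hyx : y < x := lt_of_not_ge hxy
      have hbound : ∀ z ∈ x :: t1, y ≤ z := fun z hz => le_of_lt (lt_of_lt_of_le hyx (pv_sorted_head_le x t1 h1 z hz))
      refine ⟨by simp [popQ, hxy], ?_, ?_, by simp [popQ, hxy]; exact h1, ?_, by simp [popQ, hxy], ?_⟩
      · intro z hz
        simp only [popQ, if_neg hxy]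
        rcases List.mem_append.1 hz with hz | hz
        · exact hbound z hz
        · exact pv_sorted_head_le y t2 h2 z hz
      · have hnm : y ∉ x :: t1 := by
          intro hmem
          exact absurd rfl (ne_of_lt (lt_of_lt_of_le hyx (pv_sorted_head_le x t1 h1 y hmem))).symm
        simp only [popQ, if_neg hxy]
        rw [List.erase_append_right _ hnm, List.erase_cons_head]
      · simp only [popQ, if_neg hxy]
        exact (List.sorted_cons.1 h2).2
      · simp only [popQ, if_neg hxy]
        exact List.subset_cons_self y t2

-- head membership in dropLast of a list with at least two elements
theorem pv_head_mem_dropLast (y : Int) (t : List Int) (ht : t ≠ []) :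
    y ∈ (y :: t).dropLast := by
  cases t with
  | nil => exact absurd rfl ht
  | cons b t' => simp

-- a sorted list's elements are bounded by its last element
theorem pv_le_getLast (l : List Int) (hs : l.Sorted (· ≤ ·)) :
    ∀ y ∈ l, ∀ L ∈ l.getLast?, y ≤ L := by
  induction l with
  | nil => simp
  | cons a t ih =>
    intro y hy L hL
    cases t with
    | nil =>
      simp at hy hL
      omega
    | cons b t' =>
      rw [List.getLast?_cons_cons] at hL
      rcases List.mem_cons.1 hy with rfl | hy
      · have hbL : b ≤ L := ih (List.sorted_cons.1 hs).2 b (by simp) L hL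
        have : y ≤ b := (List.sorted_cons.1 hs).1 b (by simp)
        omega
      · exact ih (List.sorted_cons.1 hs).2 y hy L hL

-- the invariant bounds the last merged value by 3× the popped minimum, whenever
-- the merged queue is not emptied by the pop
theorem pv_key (q1 q2 : List Int) (h : 1 ≤ q1.length + q2.length)
    (hinv : Q2Inv q1 q2) :
    ∀ L ∈ q2.getLast?, (popQ q1 q2).2.2 ≠ [] → L ≤ 3 * (popQ q1 q2).1 := by
  intro L hL hne
  match q1, q2 with
  | [], [] => simp at hL
  | x :: t1, [] => simp at hL
  | [], y :: t2 =>
    simp only [popQ] at hne ⊢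
    exact hinv L hL y (by simpa using pv_head_mem_dropLast y t2 hne)
  | x :: t1, y :: t2 =>
    by_cases hxy : x ≤ y
    · simp only [popQ, if_pos hxy]
      exact hinv L hL x (by simp)
    · simp only [popQ, if_neg hxy] at hne ⊢
      exact hinv L hL y (by simpa using List.mem_append_right (x :: t1) (pv_head_mem_dropLast y t2 hne))

theorem pv_loop_agree (K : Int) (n : Nat) :
    ∀ (q1 q2 l : List Int) (answer : Int),
      q1.length + q2.length = n →
      q1.Sorted (· ≤ ·) → q2.Sorted (· ≤ ·) →
      (q1 ++ q2).Perm l → Q2Inv q1 q2 →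
      solutionLoop K l answer = solutionAltLoop K q1 q2 answer := by
  induction n using Nat.strong_induction_on with
  | _ n IH =>
  intro q1 q2 l answer hlen hs1 hs2 hperm hinv
  have hlenl : l.length = q1.length + q2.length := by
    have := hperm.length_eq
    simpa using this.symm
  by_cases hn : 2 ≤ q1.length + q2.length
  · -- loop step
    obtain ⟨hamem, hale, herase, hs1', hs2', hsub1, hsub2⟩ :=
      pv_pop_spec q1 q2 (by omega) hs1 hs2
    obtain ⟨hbmem, hble, herase2, hs1'', hs2'', hsub1', hsub2'⟩ :=
      pv_pop_spec (popQ q1 q2).2.1 (popQ q1 q2).2.2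
        (by have := popQ_length q1 q2 (by omega); omega) hs1' hs2'
    set a := (popQ q1 q2).1 with ha
    set q1' := (popQ q1 q2).2.1 with hq1'
    set q2' := (popQ q1 q2).2.2 with hq2'
    set b := (popQ q1' q2').1 with hb
    set q1'' := (popQ q1' q2').2.1 with hq1''
    set q2'' := (popQ q1' q2').2.2 with hq2''
    have hminl : l.min? = some a :=
      pv_min?_eq l a (hperm.subset hamem) (fun z hz => hale z (hperm.symm.subset hz))
    have hpermerase : (q1' ++ q2').Perm (l.erase a) := by
      rw [← herase]; exact hperm.erase a
    have hminl1 : (l.erase a).min? = some b :=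
      pv_min?_eq _ b (hpermerase.subset hbmem) (fun z hz => hble z (hpermerase.symm.subset hz))
    have hab : a ≤ b := hale b (by rw [← herase] at hbmem; exact List.mem_of_mem_erase hbmem)
    have hlen' : q1'.length + q2'.length + 1 = q1.length + q2.length :=
      popQ_length q1 q2 (by omega)
    have hlen'' : q1''.length + q2''.length + 1 = q1'.length + q2'.length :=
      popQ_length q1' q2' (by omega)
    -- every survivor is ≥ b
    have hsurv : ∀ x ∈ q1'' ++ q2'', b ≤ x := by
      intro x hx
      apply hble
      rw [← herase2] at hx
      exact List.mem_of_mem_erase hx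
    -- every surviving merged value is ≤ the new merged value a + 2*b
    have hkey : ∀ y ∈ q2'', y ≤ a + 2 * b := by
      intro y hy
      by_cases hq2'e : q2' = []
      · rw [hq2'e] at hsub2'
        exact absurd (hsub2' hy) (List.not_mem_nil)
      · have hyq2 : y ∈ q2 := hsub2 (hsub2' hy)
        have hq2ne : q2 ≠ [] := by intro e; rw [e] at hyq2; exact absurd hyq2 (List.not_mem_nil)
        obtain ⟨L, hL⟩ := List.getLast?_isSome.2 hq2ne |> Option.isSome_iff_exists.1
        have hyL : y ≤ L := pv_le_getLast q2 hs2 y hyq2 L hL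
        have hLa : L ≤ 3 * a := pv_key q1 q2 (by omega) hinv L hL hq2'e
        omega
    have hmsorted : (q2'' ++ [a + 2 * b]).Sorted (· ≤ ·) := by
      refine List.pairwise_append.2 ⟨hs2'', by simp, ?_⟩
      intro y hy z hz
      rw [List.mem_singleton] at hz
      subst hz
      exact hkey y hy
    have hpermnew : (q1'' ++ (q2'' ++ [a + 2 * b])).Perm ((a + b * 2) :: (l.erase a).erase b) := by
      have h1 : (q1'' ++ q2'').Perm ((l.erase a).erase b) := by
        rw [← herase2]; exact hpermerase.erase b
      have h3 : a + b * 2 = a + 2 * b := by ring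
      rw [h3, ← List.append_assoc]
      exact (List.perm_append_singleton _ _).trans (h1.cons _)
    have hinvnew : Q2Inv q1'' (q2'' ++ [a + 2 * b]) := by
      intro L hL x hx
      rw [List.getLast?_concat] at hL
      rw [List.dropLast_concat] at hx
      rcases Option.some_inj.1 hL.symm with rfl
      have hbx : b ≤ x := hsurv x hx
      omega
    -- unfold one loop step on each side
    rw [solutionLoop.eq_def, solutionAltLoop.eq_def]
    rw [dif_pos (by omega : 2 ≤ l.length), dif_pos hn]
    rw [hminl]
    simp only [Option.getD_some, ← ha, ← hq1', ← hq2', ← hb, ← hq1'', ← hq2'']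
    by_cases hK : a ≥ K
    · rw [if_pos hK, if_pos hK]
    · rw [if_neg hK, if_neg hK]
      rw [hminl1]
      simp only [Option.getD_some]
      exact IH (q1''.length + (q2'' ++ [a + 2 * b]).length) (by simp; omega)
        q1'' (q2'' ++ [a + 2 * b]) _ (answer + 1) rfl hs1'' hmsorted hpermnew hinvnew
  · -- at most one element left
    have hlne : ¬ 2 ≤ l.length := by omega
    rw [solutionLoop.eq_def, solutionAltLoop.eq_def, dif_neg hlne, dif_neg hn]
    cases q1 with
    | nil =>
      cases q2 with
      | nil =>
        have hl : l = [] := by simpa using hperm.symm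
        subst hl; simp
      | cons y t2 =>
        cases t2 with
        | nil =>
          have hl : l = [y] := by simpa using hperm.symm
          subst hl; simp
        | cons y2 t2' => exact absurd (by simp only [List.length_cons, List.length_nil]; omega) hn
    | cons x t1 =>
      cases t1 with
      | nil =>
        cases q2 with
        | nil =>
          have hl : l = [x] := by simpa using hperm.symm
          subst hl; simp
        | cons y t2 => exact absurd (by simp only [List.length_cons, List.length_nil]; omega) hn
      | cons x2 t1' => exact absurd (by simp only [List.length_cons, List.length_nil]; omega) hn

-- ===== VERDICT (by name: the statement is the Claim_ definition above) =====
theorem solution_spec : Claim_equal_solution := by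
  intro scoville K _ _
  unfold Spec_solution solution solution_alt
  refine pv_loop_agree K scoville.length _ _ _ _ ?_ ?_ ?_ ?_ ?_
  · simpa using (PySem.List.sorted_perm (xs := scoville) (key := fun x => x) (rev := false)).length_eq
  · simpa using PySem.List.sorted_pairwise (xs := scoville) (key := fun x => x)
  · exact List.Pairwise.nil
  · simpa using PySem.List.sorted_perm (xs := scoville) (key := fun x => x) (rev := false)
  · intro L hL; simp at hL
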